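-- pv_equiv track=rewrite | github.com/johan-droid/GraftAI | backend/ai/agents/booking_agent.py | _classify_meeting_type
-- ===== SOURCE A (Python) =====
-- from typing import Dict, Any, List
--
-- def _classify_meeting_type(title: str, attendees: List[Dict[str, Any]]) -> str:
--     """Classify meeting type based on title and attendees"""
--     title_lower = title.lower()
--
--     if any(word in title_lower for word in ["interview", "screening"]):
--         return "interview"
--     elif any(word in title_lower for word in ["review", "1:1", "one-on-one"]):
--         return "review"
--     elif any(word in title_lower for word in ["workshop", "training", "demo"]):
--         return "workshop"
--     elif any(word in title_lower for word in ["sync", "standup", "daily"]):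
--         return "standup"
--     elif len(attendees) > 10:
--         return "all_hands"
--     else:
--         return "general"
-- ===== SOURCE B (Python) =====
-- # Single positional scan: walk the lowercased title once, at each position try
-- # every keyword with startswith, and keep the minimum rule priority seen.
-- _KEYWORDS = {
--     "interview": 0, "screening": 0,
--     "review": 1, "1:1": 1, "one-on-one": 1,
--     "workshop": 2, "training": 2, "demo": 2,
--     "sync": 3, "standup": 3, "daily": 3,
-- }
-- _LABELS = ["interview", "review", "workshop", "standup"]
--
-- def _classify_meeting_type(title, attendees):
--     t = title.lower()
--     best = 4
--     for i in range(len(t)):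
--         for kw, pr in _KEYWORDS.items():
--             if pr < best and t.startswith(kw, i):
--                 best = pr
--     if best < 4:
--         return _LABELS[best]
--     return "all_hands" if len(attendees) > 10 else "general"
-- ===== Notes on version B (the rewrite author's own statement) =====
-- stated objective: alternative
-- what changed: Replaces A's per-category substring tests ('word in title') with a single positional scan of the lowercased title that tries every keyword via startswith at each index and keeps the minimum rule priority, mapping it to a label afterwards; the attendee fallback fires only when no keyword matched anywhere.
import Mathlib
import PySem

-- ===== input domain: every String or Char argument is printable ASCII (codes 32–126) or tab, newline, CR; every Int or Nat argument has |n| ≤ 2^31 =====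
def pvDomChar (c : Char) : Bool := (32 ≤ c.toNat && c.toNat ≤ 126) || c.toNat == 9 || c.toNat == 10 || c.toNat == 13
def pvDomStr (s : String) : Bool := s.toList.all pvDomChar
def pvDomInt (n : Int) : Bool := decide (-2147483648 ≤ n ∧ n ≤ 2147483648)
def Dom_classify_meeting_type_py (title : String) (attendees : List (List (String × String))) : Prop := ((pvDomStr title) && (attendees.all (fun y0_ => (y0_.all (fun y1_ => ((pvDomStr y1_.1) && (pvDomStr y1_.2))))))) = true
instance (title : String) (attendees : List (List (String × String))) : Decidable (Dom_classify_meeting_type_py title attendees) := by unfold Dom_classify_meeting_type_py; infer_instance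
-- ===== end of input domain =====

-- B replaces A's per-category substring tests with a single positional scan of the lowercased
-- title, trying every keyword via startswith at each index, keeping the minimum rule priority
-- (alternative algorithm; same asymptotic cost).


-- ===== PORT A =====
def classify_meeting_type_py (title : String) (attendees : List (List (String × String))) : String :=
  let title_lower := PySem.Str.lower title
  if (["interview", "screening"] : List String).any (fun word => PySem.Str.isIn word title_lower) then
    "interview"
  else if (["review", "1:1", "one-on-one"] : List String).any (fun word => PySem.Str.isIn word title_lower) then
    "review"
  else if (["workshop", "training", "demo"] : List String).any (fun word => PySem.Str.isIn word title_lower) then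
    "workshop"
  else if (["sync", "standup", "daily"] : List String).any (fun word => PySem.Str.isIn word title_lower) then
    "standup"
  else if attendees.length > 10 then
    "all_hands"
  else
    "general"

-- ===== PORT B =====
-- the keyword → priority table of Source B (dict in insertion order)
def pvKeywords : List (String × Nat) :=
  [("interview", 0), ("screening", 0),
   ("review", 1), ("1:1", 1), ("one-on-one", 1),
   ("workshop", 2), ("training", 2), ("demo", 2),
   ("sync", 3), ("standup", 3), ("daily", 3)]

def pvLabels : List String := ["interview", "review", "workshop", "standup"]

-- inner loop of Source B: try every keyword at position i (t.startswith(kw, i))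
def pvInner (t : List Char) (i : Nat) (best : Nat) : Nat :=
  pvKeywords.foldl
    (fun b kp => if kp.2 < b && PySem.Chars.startswith (t.drop i) kp.1.toList then kp.2 else b)
    best

-- outer loop of Source B: scan every position of the title once
def pvBest (t : List Char) : Nat :=
  (List.range t.length).foldl (fun b i => pvInner t i b) 4

def classify_meeting_type_py_alt (title : String) (attendees : List (List (String × String))) : String :=
  let t := (PySem.Str.lower title).toList
  let best := pvBest t
  if best < 4 then pvLabels.getD best ""   -- _LABELS[best]; the guard makes the index in range
  else if attendees.length > 10 then "all_hands" else "general"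

-- ===== PRECONDITION & SPEC =====
def Spec_classify_meeting_type_py (title : String) (attendees : List (List (String × String))) (out : String) : Prop := out = classify_meeting_type_py_alt title attendees
instance (title : String) (attendees : List (List (String × String))) (out : String) : Decidable (Spec_classify_meeting_type_py title attendees out) := by unfold Spec_classify_meeting_type_py; infer_instance

-- ===== CLAIM (what is proved, stated in full; the proofs are below) =====
def Claim_equal_classify_meeting_type_py : Prop := ∀ (title : String) (attendees : List (List (String × String))), Dom_classify_meeting_type_py title attendees → Spec_classify_meeting_type_py title attendees (classify_meeting_type_py title attendees)

-- ===== LEMMAS AND PROOFS =====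

-- generic facts about a fold whose step never increases the accumulator
theorem pvFoldl_le {α : Type} (f : Nat → α → Nat) (h : ∀ b x, f b x ≤ b) :
    ∀ (L : List α) (b : Nat), L.foldl f b ≤ b := by
  intro L
  induction L with
  | nil => intro b; simp
  | cons x L ih => intro b; exact le_trans (ih (f b x)) (h b x)

theorem pvFoldl_le_of_mem {α : Type} (f : Nat → α → Nat) (h : ∀ b x, f b x ≤ b)
    {c : Nat} {x : α} (hx : ∀ b, f b x ≤ c) :
    ∀ (L : List α) (b : Nat), x ∈ L → L.foldl f b ≤ c := by
  intro L
  induction L with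
  | nil => intro b hb; simp at hb
  | cons y L ih =>
    intro b hb
    rcases List.mem_cons.mp hb with rfl | hmem
    · exact le_trans (pvFoldl_le f h L (f b x)) (hx b)
    · exact ih (f b y) hmem

theorem pvFoldl_char {α : Type} (f : Nat → α → Nat) (Q : α → Nat → Prop)
    (h : ∀ b x, f b x = b ∨ Q x (f b x)) :
    ∀ (L : List α) (b : Nat), L.foldl f b = b ∨ ∃ x ∈ L, Q x (L.foldl f b) := by
  intro L
  induction L with
  | nil => intro b; simp
  | cons x L ih =>
    intro b
    rcases ih (f b x) with heq | ⟨y, hy, hQ⟩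
    · simp only [List.foldl_cons, heq]
      rcases h b x with heq2 | hQ
      · exact Or.inl heq2
      · exact Or.inr ⟨x, List.mem_cons_self, hQ⟩
    · exact Or.inr ⟨y, List.mem_cons_of_mem _ hy, hQ⟩

-- the inner loop's step never increases best, and only matched priorities replace it
theorem pvInner_le (t : List Char) (i b : Nat) : pvInner t i b ≤ b := by
  apply pvFoldl_le
  intro b kp
  dsimp only
  split
  · next hc =>
      simp only [Bool.and_eq_true, decide_eq_true_eq] at hc
      exact le_of_lt hc.1
  · exact le_refl b

theorem pvInner_le_of_match (t : List Char) (i b : Nat) (kp : String × Nat)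
    (hmem : kp ∈ pvKeywords) (hsw : PySem.Chars.startswith (t.drop i) kp.1.toList = true) :
    pvInner t i b ≤ kp.2 := by
  apply pvFoldl_le_of_mem _ _ _ _ _ hmem
  · intro b kp
    dsimp only
    split
    · next hc =>
        simp only [Bool.and_eq_true, decide_eq_true_eq] at hc
        exact le_of_lt hc.1
    · exact le_refl _
  · intro b
    dsimp only
    rw [hsw]
    by_cases h : kp.2 < b
    · simp [h]
    · simp [h]; omega

theorem pvInner_char (t : List Char) (i b : Nat) :
    pvInner t i b = b ∨ ∃ kp ∈ pvKeywords,
      PySem.Chars.startswith (t.drop i) kp.1.toList = true ∧ pvInner t i b = kp.2 := by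
  refine pvFoldl_char _
    (fun (kp : String × Nat) n => PySem.Chars.startswith (t.drop i) kp.1.toList = true ∧ n = kp.2) ?_ _ _
  intro b kp
  dsimp only
  split
  · next hc =>
      simp only [Bool.and_eq_true] at hc
      exact Or.inr ⟨hc.2, rfl⟩
  · exact Or.inl rfl

-- the outer loop
theorem pvBest_le_of_match (t : List Char) (i : Nat) (hi : i < t.length)
    (kp : String × Nat) (hmem : kp ∈ pvKeywords)
    (hsw : PySem.Chars.startswith (t.drop i) kp.1.toList = true) :
    pvBest t ≤ kp.2 := by
  exact pvFoldl_le_of_mem _ (fun b i => pvInner_le t i b)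
    (fun b => pvInner_le_of_match t i b kp hmem hsw) _ _ (List.mem_range.mpr hi)

theorem pvBest_char (t : List Char) :
    pvBest t = 4 ∨ ∃ i ∈ List.range t.length, ∃ kp ∈ pvKeywords,
      PySem.Chars.startswith (t.drop i) kp.1.toList = true ∧ pvBest t = kp.2 := by
  refine pvFoldl_char _
    (fun i n => ∃ kp ∈ pvKeywords,
      PySem.Chars.startswith (t.drop i) kp.1.toList = true ∧ n = kp.2) ?_ _ _
  intro b i
  rcases pvInner_char t i b with h | ⟨kp, hmem, hsw, heq⟩
  · exact Or.inl h
  · exact Or.inr ⟨kp, hmem, hsw, heq⟩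

-- bridge: a positional startswith match somewhere in range ↔ Python's 'kw in t'
theorem pvMatch_iff_isIn (kw : String) (t : List Char) (hne : kw.toList ≠ []) :
    (∃ i, i < t.length ∧ PySem.Chars.startswith (t.drop i) kw.toList = true)
      ↔ PySem.Chars.isIn kw.toList t = true := by
  constructor
  · rintro ⟨i, _, hsw⟩
    exact (PySem.Chars.exists_prefix_drop_iff_isIn _ _).mp
      ⟨i, (PySem.Chars.startswith_iff _ _).mp hsw⟩
  · intro h
    rcases (PySem.Chars.exists_prefix_drop_iff_isIn _ _).mpr h with ⟨j, hj⟩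
    by_cases hlt : j < t.length
    · exact ⟨j, hlt, (PySem.Chars.startswith_iff _ _).mpr hj⟩
    · exfalso
      rw [List.drop_eq_nil_of_le (le_of_not_gt hlt)] at hj
      exact hne (List.prefix_nil.mp hj)

-- Str.isIn on the lowered title equals Chars.isIn on its toList
theorem pvStrIsIn (w s : String) :
    PySem.Str.isIn w s = PySem.Chars.isIn w.toList s.toList := by
  simp [PySem.Str.isIn]

-- each keyword is nonempty, so a whole-string match always has a position in range
theorem pvKeywords_ne : ∀ kp ∈ pvKeywords, kp.1.toList ≠ [] := by decide

theorem pvBest_le_of_isIn (t : List Char) (kw : String) (pr : Nat)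
    (hmem : (kw, pr) ∈ pvKeywords) (h : PySem.Chars.isIn kw.toList t = true) :
    pvBest t ≤ pr := by
  rcases (pvMatch_iff_isIn kw t (pvKeywords_ne _ hmem)).mpr h with ⟨i, hi, hsw⟩
  exact pvBest_le_of_match t i hi (kw, pr) hmem hsw

theorem pvBest_cases (t : List Char) :
    pvBest t = 4 ∨ ∃ kp ∈ pvKeywords,
      PySem.Chars.isIn kp.1.toList t = true ∧ pvBest t = kp.2 := by
  rcases pvBest_char t with h | ⟨i, hi, kp, hmem, hsw, heq⟩
  · exact Or.inl h
  · exact Or.inr ⟨kp, hmem,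
      (pvMatch_iff_isIn kp.1 t (pvKeywords_ne _ hmem)).mp
        ⟨i, List.mem_range.mp hi, hsw⟩, heq⟩

-- the minimum-priority scan agrees with the ordered chain of substring tests
theorem pvBest_eq (t : List Char) :
    pvBest t =
      if PySem.Chars.isIn "interview".toList t || PySem.Chars.isIn "screening".toList t then 0
      else if PySem.Chars.isIn "review".toList t || PySem.Chars.isIn "1:1".toList t || PySem.Chars.isIn "one-on-one".toList t then 1
      else if PySem.Chars.isIn "workshop".toList t || PySem.Chars.isIn "training".toList t || PySem.Chars.isIn "demo".toList t then 2
      else if PySem.Chars.isIn "sync".toList t || PySem.Chars.isIn "standup".toList t || PySem.Chars.isIn "daily".toList t then 3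
      else 4 := by
  split_ifs with h0 h1 h2 h3
  · simp only [Bool.or_eq_true] at h0
    rcases h0 with h | h
    · exact Nat.le_zero.mp (pvBest_le_of_isIn t "interview" 0 (by decide) h)
    · exact Nat.le_zero.mp (pvBest_le_of_isIn t "screening" 0 (by decide) h)
  · simp only [Bool.or_eq_true] at h1
    have hub : pvBest t ≤ 1 := by
      rcases h1 with (h | h) | h
      · exact pvBest_le_of_isIn t "review" 1 (by decide) h
      · exact pvBest_le_of_isIn t "1:1" 1 (by decide) h
      · exact pvBest_le_of_isIn t "one-on-one" 1 (by decide) h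
    rcases pvBest_cases t with h4 | ⟨kp, hmem, hin, heq⟩
    · omega
    · simp only [pvKeywords, List.mem_cons, List.not_mem_nil, or_false] at hmem
      rcases hmem with rfl | rfl | rfl | rfl | rfl | rfl | rfl | rfl | rfl | rfl | rfl <;>
        simp_all
  · simp only [Bool.or_eq_true] at h2
    have hub : pvBest t ≤ 2 := by
      rcases h2 with (h | h) | h
      · exact pvBest_le_of_isIn t "workshop" 2 (by decide) h
      · exact pvBest_le_of_isIn t "training" 2 (by decide) h
      · exact pvBest_le_of_isIn t "demo" 2 (by decide) h
    rcases pvBest_cases t with h4 | ⟨kp, hmem, hin, heq⟩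
    · omega
    · simp only [pvKeywords, List.mem_cons, List.not_mem_nil, or_false] at hmem
      rcases hmem with rfl | rfl | rfl | rfl | rfl | rfl | rfl | rfl | rfl | rfl | rfl <;>
        simp_all
  · simp only [Bool.or_eq_true] at h3
    have hub : pvBest t ≤ 3 := by
      rcases h3 with (h | h) | h
      · exact pvBest_le_of_isIn t "sync" 3 (by decide) h
      · exact pvBest_le_of_isIn t "standup" 3 (by decide) h
      · exact pvBest_le_of_isIn t "daily" 3 (by decide) h
    rcases pvBest_cases t with h4 | ⟨kp, hmem, hin, heq⟩
    · omega
    · simp only [pvKeywords, List.mem_cons, List.not_mem_nil, or_false] at hmem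
      rcases hmem with rfl | rfl | rfl | rfl | rfl | rfl | rfl | rfl | rfl | rfl | rfl <;>
        simp_all
  · rcases pvBest_cases t with h4 | ⟨kp, hmem, hin, heq⟩
    · exact h4
    · simp only [pvKeywords, List.mem_cons, List.not_mem_nil, or_false] at hmem
      rcases hmem with rfl | rfl | rfl | rfl | rfl | rfl | rfl | rfl | rfl | rfl | rfl <;>
        simp_all

-- ===== VERDICT (by name: the statement is the Claim_ definition above) =====
theorem classify_meeting_type_py_spec : Claim_equal_classify_meeting_type_py := by
  intro title attendees _
  unfold Spec_classify_meeting_type_py classify_meeting_type_py classify_meeting_type_py_alt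
  simp only [List.any_cons, List.any_nil, Bool.or_false, pvStrIsIn,
    pvBest_eq ((PySem.Str.lower title).toList)]
  split_ifs <;> simp_all [pvLabels]
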